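-- pv_equiv track=rewrite | github.com/cloakquillresearch-2026/neurobotanica_mvp | backend/services/patentpath/claim_generator.py | _infer_compound_class
-- ===== SOURCE A (Python) =====
-- def _infer_compound_class(compound_name: str) -> str:
--     """Infer compound class from name."""
--     name_lower = compound_name.lower()
--
--     if "dimer" in name_lower:
--         return "dimeric cannabinoid compound"
--     elif any(cb in name_lower for cb in ["thc", "tetrahydrocannabinol"]):
--         return "tetrahydrocannabinol derivative"
--     elif any(cb in name_lower for cb in ["cbd", "cannabidiol"]):
--         return "cannabidiol derivative"
--     elif any(cb in name_lower for cb in ["cbg", "cannabigerol"]):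
--         return "cannabigerol derivative"
--     elif any(cb in name_lower for cb in ["cbn", "cannabinol"]):
--         return "cannabinol derivative"
--     elif "cannabin" in name_lower:
--         return "cannabinoid compound"
--     else:
--         return "organic compound of pharmaceutical interest"
-- ===== SOURCE B (Python) =====
-- _LABELS = [
--     "dimeric cannabinoid compound",
--     "tetrahydrocannabinol derivative",
--     "cannabidiol derivative",
--     "cannabigerol derivative",
--     "cannabinol derivative",
--     "cannabinoid compound",
--     "organic compound of pharmaceutical interest",
-- ]
--
-- _PATTERNS = [
--     ("dimer", 0), ("thc", 1), ("tetrahydrocannabinol", 1),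
--     ("cbd", 2), ("cannabidiol", 2), ("cbg", 3), ("cannabigerol", 3),
--     ("cbn", 4), ("cannabinol", 4), ("cannabin", 5),
-- ]
--
-- def _infer_compound_class(compound_name: str) -> str:
--     """Single scan over positions: keep the minimum rank of any pattern starting there."""
--     name = compound_name.lower()
--     best = 6
--     for i in range(len(name)):
--         for pat, rank in _PATTERNS:
--             if rank < best and name.startswith(pat, i):
--                 best = rank
--     return _LABELS[best]
-- ===== Notes on version B (the rewrite author's own statement) =====
-- stated objective: alternative
-- what changed: Replaces A's ordered sequence of six independent substring searches by a single left-to-right scan over the positions of the lowered name that maintains the minimum rank of any of the ten patterns starting at each position, then indexes a label table with that rank.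
import Mathlib
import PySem

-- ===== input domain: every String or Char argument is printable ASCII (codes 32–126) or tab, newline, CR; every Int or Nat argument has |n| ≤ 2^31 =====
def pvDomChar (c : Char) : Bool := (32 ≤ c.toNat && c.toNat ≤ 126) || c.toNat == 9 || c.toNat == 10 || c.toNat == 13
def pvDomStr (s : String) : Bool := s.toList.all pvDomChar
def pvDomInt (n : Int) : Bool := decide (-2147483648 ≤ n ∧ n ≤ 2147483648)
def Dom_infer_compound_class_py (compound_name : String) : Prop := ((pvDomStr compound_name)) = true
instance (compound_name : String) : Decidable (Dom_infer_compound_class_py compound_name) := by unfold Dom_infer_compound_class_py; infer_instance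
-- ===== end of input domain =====

-- B replaces A's ordered substring searches by one positional scan keeping the minimum matched pattern rank (alternative algorithm, same cost).


-- ===== PORT A =====
def infer_compound_class_py (compound_name : String) : String :=
  let name_lower := PySem.Str.lower compound_name
  if PySem.Str.isIn "dimer" name_lower then
    "dimeric cannabinoid compound"
  else if (["thc", "tetrahydrocannabinol"].any (fun cb => PySem.Str.isIn cb name_lower)) then
    "tetrahydrocannabinol derivative"
  else if (["cbd", "cannabidiol"].any (fun cb => PySem.Str.isIn cb name_lower)) then
    "cannabidiol derivative"
  else if (["cbg", "cannabigerol"].any (fun cb => PySem.Str.isIn cb name_lower)) then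
    "cannabigerol derivative"
  else if (["cbn", "cannabinol"].any (fun cb => PySem.Str.isIn cb name_lower)) then
    "cannabinol derivative"
  else if PySem.Str.isIn "cannabin" name_lower then
    "cannabinoid compound"
  else
    "organic compound of pharmaceutical interest"

-- ===== PORT B =====
def pvLabels : List String :=
  [ "dimeric cannabinoid compound",
    "tetrahydrocannabinol derivative",
    "cannabidiol derivative",
    "cannabigerol derivative",
    "cannabinol derivative",
    "cannabinoid compound",
    "organic compound of pharmaceutical interest" ]

def pvPatterns : List (List Char × Nat) :=
  [ ("dimer".toList, 0), ("thc".toList, 1), ("tetrahydrocannabinol".toList, 1),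
    ("cbd".toList, 2), ("cannabidiol".toList, 2), ("cbg".toList, 3), ("cannabigerol".toList, 3),
    ("cbn".toList, 4), ("cannabinol".toList, 4), ("cannabin".toList, 5) ]

-- name.startswith(pat, i) with 0 ≤ i ≤ len(name) is exactly Chars.startswith of the i-th suffix
def infer_compound_class_py_alt (compound_name : String) : String :=
  let cs := (PySem.Str.lower compound_name).toList
  let best := (List.range cs.length).foldl
    (fun b i => pvPatterns.foldl
      (fun b pr => if pr.2 < b && PySem.Chars.startswith (cs.drop i) pr.1 then pr.2 else b) b) 6
  pvLabels.getD best "organic compound of pharmaceutical interest"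

-- ===== PRECONDITION & SPEC =====
def Spec_infer_compound_class_py (compound_name : String) (out : String) : Prop := out = infer_compound_class_py_alt compound_name
instance (compound_name : String) (out : String) : Decidable (Spec_infer_compound_class_py compound_name out) := by unfold Spec_infer_compound_class_py; infer_instance

-- ===== CLAIM =====
def Claim_equal_infer_compound_class_py : Prop := ∀ (compound_name : String), Dom_infer_compound_class_py compound_name → Spec_infer_compound_class_py compound_name (infer_compound_class_py compound_name)

-- ===== LEMMAS AND PROOFS =====

-- minimum rank of a pattern starting at position i (6 if none)
def pvPosMin (cs : List Char) (i : Nat) : Nat :=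
  pvPatterns.foldr (fun pr m => if PySem.Chars.startswith (cs.drop i) pr.1 then min pr.2 m else m) 6

-- minimum rank of a pattern starting at any position < n
def pvBest (cs : List Char) : Nat → Nat
  | 0 => 6
  | n + 1 => min (pvBest cs n) (pvPosMin cs n)

theorem pv_inner_eq (d : List Char) (P : List (List Char × Nat)) :
    ∀ b : Nat, b ≤ 6 →
      P.foldl (fun b pr => if pr.2 < b && PySem.Chars.startswith d pr.1 then pr.2 else b) b
        = min b (P.foldr (fun pr m => if PySem.Chars.startswith d pr.1 then min pr.2 m else m) 6) := by
  induction P with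
  | nil => intro b hb; simp; omega
  | cons pr P ih =>
      intro b hb
      simp only [List.foldl_cons, List.foldr_cons]
      cases h : PySem.Chars.startswith d pr.1
      · simp only [Bool.and_false, Bool.false_eq_true, if_false]
        exact ih b hb
      · simp only [Bool.and_true, decide_eq_true_eq]
        rw [ih _ (by split <;> omega)]
        split_ifs <;> omega

theorem pv_outer_eq (cs : List Char) :
    ∀ (n : Nat) (b : Nat), b ≤ 6 →
      (List.range n).foldl
        (fun b i => pvPatterns.foldl
          (fun b pr => if pr.2 < b && PySem.Chars.startswith (cs.drop i) pr.1 then pr.2 else b) b) b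
        = min b (pvBest cs n) := by
  intro n
  induction n with
  | zero => intro b hb; simp [pvBest]; omega
  | succ n ih =>
      intro b hb
      rw [List.range_succ, List.foldl_append, ih b hb, List.foldl_cons, List.foldl_nil,
          pv_inner_eq _ _ _ (by omega)]
      simp only [pvBest, pvPosMin]
      omega

theorem pvBest_le_six (cs : List Char) (n : Nat) : pvBest cs n ≤ 6 := by
  induction n with
  | zero => simp [pvBest]
  | succ n ih => simp only [pvBest]; omega

theorem pvPosMin_le_iff (cs : List Char) (i r : Nat) (hr : r < 6) :
    pvPosMin cs i ≤ r ↔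
      ∃ pr ∈ pvPatterns, PySem.Chars.startswith (cs.drop i) pr.1 = true ∧ pr.2 ≤ r := by
  unfold pvPosMin
  generalize pvPatterns = P
  induction P with
  | nil => simp; omega
  | cons pr P ih =>
      simp only [List.foldr_cons]
      cases h : PySem.Chars.startswith (cs.drop i) pr.1
      · rw [if_neg (by simp)]
        rw [ih]
        constructor
        · rintro ⟨pr', hm, hsw, hle⟩
          exact ⟨pr', List.mem_cons_of_mem _ hm, hsw, hle⟩
        · rintro ⟨pr', hm, hsw, hle⟩
          rcases List.mem_cons.mp hm with rfl | hm'
          · rw [h] at hsw; cases hsw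
          · exact ⟨pr', hm', hsw, hle⟩
      · rw [if_pos (by simp)]
        constructor
        · intro hmin
          have : pr.2 ≤ r ∨ (P.foldr (fun pr m => if PySem.Chars.startswith (cs.drop i) pr.1 then min pr.2 m else m) 6) ≤ r := by omega
          rcases this with h1 | h2
          · exact ⟨pr, List.mem_cons_self, h, h1⟩
          · rcases ih.mp h2 with ⟨pr', hm, hsw, hle⟩
            exact ⟨pr', List.mem_cons_of_mem _ hm, hsw, hle⟩
        · rintro ⟨pr', hm, hsw, hle⟩
          rcases List.mem_cons.mp hm with rfl | hm'
          · omega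
          · have := ih.mpr ⟨pr', hm', hsw, hle⟩; omega

theorem pvBest_le_iff (cs : List Char) (n r : Nat) (hr : r < 6) :
    pvBest cs n ≤ r ↔
      ∃ i < n, ∃ pr ∈ pvPatterns, PySem.Chars.startswith (cs.drop i) pr.1 = true ∧ pr.2 ≤ r := by
  induction n with
  | zero => simp [pvBest]; omega
  | succ n ih =>
      simp only [pvBest]
      constructor
      · intro h
        have : pvBest cs n ≤ r ∨ pvPosMin cs n ≤ r := by omega
        rcases this with h1 | h2
        · rcases ih.mp h1 with ⟨i, hi, rest⟩
          exact ⟨i, by omega, rest⟩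
        · rcases (pvPosMin_le_iff cs n r hr).mp h2 with ⟨pr, hpr, hsw, hle⟩
          exact ⟨n, by omega, pr, hpr, hsw, hle⟩
      · rintro ⟨i, hi, pr, hpr, hsw, hle⟩
        rcases Nat.lt_succ_iff_lt_or_eq.mp hi with hlt | heq
        · have := ih.mpr ⟨i, hlt, pr, hpr, hsw, hle⟩; omega
        · subst heq
          have := (pvPosMin_le_iff cs i r hr).mpr ⟨pr, hpr, hsw, hle⟩; omega

theorem pv_patterns_ne_nil : ∀ pr ∈ pvPatterns, pr.1 ≠ [] := by decide

-- bounded positions ↔ substring containment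
theorem pvBest_le_iff_isIn (cs : List Char) (r : Nat) (hr : r < 6) :
    pvBest cs cs.length ≤ r ↔
      ∃ pr ∈ pvPatterns, PySem.Chars.isIn pr.1 cs = true ∧ pr.2 ≤ r := by
  rw [pvBest_le_iff cs cs.length r hr]
  constructor
  · rintro ⟨i, _, pr, hpr, hsw, hle⟩
    refine ⟨pr, hpr, ?_, hle⟩
    exact (PySem.Chars.exists_prefix_drop_iff_isIn _ _).mp
      ⟨i, (PySem.Chars.startswith_iff _ _).mp hsw⟩
  · rintro ⟨pr, hpr, hin, hle⟩
    rcases (PySem.Chars.exists_prefix_drop_iff_isIn _ _).mpr hin with ⟨j, hj⟩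
    have hne : pr.1 ≠ [] := pv_patterns_ne_nil pr hpr
    have hjlt : j < cs.length := by
      by_contra hge
      rw [List.drop_eq_nil_of_le (by omega)] at hj
      exact hne (List.prefix_nil.mp hj)
    exact ⟨j, hjlt, pr, hpr, (PySem.Chars.startswith_iff _ _).mpr hj, hle⟩


theorem pv_hit (cs : List Char) (pr : List Char × Nat) (hpr : pr ∈ pvPatterns)
    (hr : pr.2 < 6) (hin : PySem.Chars.isIn pr.1 cs = true) :
    pvBest cs cs.length ≤ pr.2 :=
  (pvBest_le_iff_isIn cs pr.2 hr).mpr ⟨pr, hpr, hin, le_refl _⟩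

theorem pv_no_low (cs : List Char) (r : Nat) (hr : r < 6)
    (h : ∀ pr ∈ pvPatterns, pr.2 ≤ r → PySem.Chars.isIn pr.1 cs = false) :
    ¬ pvBest cs cs.length ≤ r := by
  intro hc
  rcases (pvBest_le_iff_isIn cs r hr).mp hc with ⟨pr, hpr, hin, hle⟩
  have := h pr hpr hle
  simp_all

theorem pvBest_eq (cs : List Char) :
    pvBest cs cs.length =
      if PySem.Chars.isIn "dimer".toList cs then 0
      else if PySem.Chars.isIn "thc".toList cs || PySem.Chars.isIn "tetrahydrocannabinol".toList cs then 1
      else if PySem.Chars.isIn "cbd".toList cs || PySem.Chars.isIn "cannabidiol".toList cs then 2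
      else if PySem.Chars.isIn "cbg".toList cs || PySem.Chars.isIn "cannabigerol".toList cs then 3
      else if PySem.Chars.isIn "cbn".toList cs || PySem.Chars.isIn "cannabinol".toList cs then 4
      else if PySem.Chars.isIn "cannabin".toList cs then 5
      else 6 := by
  have hub := pvBest_le_six cs cs.length
  split_ifs with h0 h1 h2 h3 h4 h5
  · have := pv_hit cs ("dimer".toList, 0) (by simp [pvPatterns]) (by norm_num) h0
    omega
  · rcases Bool.or_eq_true_iff.mp h1 with h | h
    · have h' := pv_hit cs ("thc".toList, 1) (by simp [pvPatterns]) (by norm_num) h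
      have hn := pv_no_low cs 0 (by omega) (by intro pr hpr hle; fin_cases hpr <;> simp_all)
      omega
    · have h' := pv_hit cs ("tetrahydrocannabinol".toList, 1) (by simp [pvPatterns]) (by norm_num) h
      have hn := pv_no_low cs 0 (by omega) (by intro pr hpr hle; fin_cases hpr <;> simp_all)
      omega
  · rcases Bool.or_eq_true_iff.mp h2 with h | h
    · have h' := pv_hit cs ("cbd".toList, 2) (by simp [pvPatterns]) (by norm_num) h
      have hn := pv_no_low cs 1 (by omega) (by intro pr hpr hle; fin_cases hpr <;> simp_all)
      omega
    · have h' := pv_hit cs ("cannabidiol".toList, 2) (by simp [pvPatterns]) (by norm_num) h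
      have hn := pv_no_low cs 1 (by omega) (by intro pr hpr hle; fin_cases hpr <;> simp_all)
      omega
  · rcases Bool.or_eq_true_iff.mp h3 with h | h
    · have h' := pv_hit cs ("cbg".toList, 3) (by simp [pvPatterns]) (by norm_num) h
      have hn := pv_no_low cs 2 (by omega) (by intro pr hpr hle; fin_cases hpr <;> simp_all)
      omega
    · have h' := pv_hit cs ("cannabigerol".toList, 3) (by simp [pvPatterns]) (by norm_num) h
      have hn := pv_no_low cs 2 (by omega) (by intro pr hpr hle; fin_cases hpr <;> simp_all)
      omega
  · rcases Bool.or_eq_true_iff.mp h4 with h | h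
    · have h' := pv_hit cs ("cbn".toList, 4) (by simp [pvPatterns]) (by norm_num) h
      have hn := pv_no_low cs 3 (by omega) (by intro pr hpr hle; fin_cases hpr <;> simp_all)
      omega
    · have h' := pv_hit cs ("cannabinol".toList, 4) (by simp [pvPatterns]) (by norm_num) h
      have hn := pv_no_low cs 3 (by omega) (by intro pr hpr hle; fin_cases hpr <;> simp_all)
      omega
  · have h' := pv_hit cs ("cannabin".toList, 5) (by simp [pvPatterns]) (by norm_num) h5
    have hn := pv_no_low cs 4 (by omega) (by intro pr hpr hle; fin_cases hpr <;> simp_all)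
    omega
  · have hn := pv_no_low cs 5 (by omega) (by intro pr hpr hle; fin_cases hpr <;> simp_all)
    omega

-- ===== VERDICT =====
theorem infer_compound_class_py_spec : Claim_equal_infer_compound_class_py := by
  intro s _
  unfold Spec_infer_compound_class_py infer_compound_class_py infer_compound_class_py_alt
  dsimp only
  rw [pv_outer_eq ((PySem.Str.lower s).toList) ((PySem.Str.lower s).toList).length 6 (le_refl 6),
      Nat.min_eq_right (pvBest_le_six _ _), pvBest_eq]
  simp only [PySem.Str.isIn_eq, List.any_cons, List.any_nil, Bool.or_false]
  split_ifs <;> simp [pvLabels]
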